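-- pv_equiv track=rewrite | github.com/yspr95-cell/battery_analysis_scripts | CDS_functions/helpers.py | filter_by_proximity
-- ===== SOURCE A (Python) =====
-- def filter_by_proximity(values, threshold):
--     """Filter values that have at least one neighbor within threshold."""
--     result = []
--     for i, val in enumerate(values):
--         has_neighbor = any(
--             i != j and abs(val - other) <= threshold
--             for j, other in enumerate(values)
--         )
--         if has_neighbor:
--             result.append(val)
--     return result
-- ===== SOURCE B (Python) =====
-- def filter_by_proximity(values, threshold):
--     """Filter values that have at least one neighbor within threshold."""
--     s = sorted(values)
--     good = set()
--     for a, b in zip(s, s[1:]):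
--         if b - a <= threshold:
--             good.add(a)
--             good.add(b)
--     return [v for v in values if v in good]
-- ===== Notes on version B (the rewrite author's own statement) =====
-- stated objective: faster
-- what changed: Replaces the quadratic all-pairs scan (for each element, rescan the whole list for a neighbor) by sorting once and scanning adjacent sorted pairs: any gap <= threshold marks both endpoints in a 'good' set, then one pass keeps the original-order values found in that set.
import Mathlib
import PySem

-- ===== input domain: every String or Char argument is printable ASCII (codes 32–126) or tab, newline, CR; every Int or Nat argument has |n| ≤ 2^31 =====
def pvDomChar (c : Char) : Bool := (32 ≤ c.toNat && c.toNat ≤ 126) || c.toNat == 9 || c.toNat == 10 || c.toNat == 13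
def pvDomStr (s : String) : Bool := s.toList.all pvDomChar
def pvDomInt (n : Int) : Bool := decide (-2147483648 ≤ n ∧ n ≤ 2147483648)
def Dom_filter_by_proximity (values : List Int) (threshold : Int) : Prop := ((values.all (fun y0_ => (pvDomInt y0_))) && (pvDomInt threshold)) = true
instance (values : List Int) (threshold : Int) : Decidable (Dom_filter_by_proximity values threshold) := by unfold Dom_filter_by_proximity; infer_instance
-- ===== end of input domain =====

-- B replaces A's quadratic all-pairs neighbor scan by one sort plus a scan of adjacent
-- sorted pairs building a 'good' set, then filters the original list by set membership.

-- ===== PORT A =====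
def filter_by_proximity (values : List Int) (threshold : Int) : List Int :=
  (PySem.List.enumerate values).foldl
    (fun result iv =>
      let hasNeighbor := (PySem.List.enumerate values).any
        (fun jo => decide (iv.1 ≠ jo.1) && decide (|iv.2 - jo.2| ≤ threshold))
      if hasNeighbor then result ++ [iv.2] else result) []

-- ===== PORT B =====
def filter_by_proximity_alt (values : List Int) (threshold : Int) : List Int :=
  let s := PySem.List.sorted values (fun x => x) false
  let good := (s.zip (PySem.List.slice s (some 1) none)).foldl
    (fun g ab => if ab.2 - ab.1 ≤ threshold then PySem.Set.add (PySem.Set.add g ab.1) ab.2 else g)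
    PySem.Set.empty
  values.filter (fun v => PySem.Set.contains good v)

-- ===== PRECONDITION & SPEC =====
def Spec_filter_by_proximity (values : List Int) (threshold : Int) (out : List Int) : Prop := out = filter_by_proximity_alt values threshold
instance (values : List Int) (threshold : Int) (out : List Int) : Decidable (Spec_filter_by_proximity values threshold out) := by unfold Spec_filter_by_proximity; infer_instance

-- ===== CLAIM (what is proved, stated in full; the proofs are below) =====
def Claim_equal_filter_by_proximity : Prop := ∀ (values : List Int) (threshold : Int), Dom_filter_by_proximity values threshold → Spec_filter_by_proximity values threshold (filter_by_proximity values threshold)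

-- ===== LEMMAS AND PROOFS =====

-- B's loop body and the set it builds, named for the proofs
def pvStep (threshold : Int) (g : List Int) (ab : Int × Int) : List Int :=
  if ab.2 - ab.1 ≤ threshold then PySem.Set.add (PySem.Set.add g ab.1) ab.2 else g

def hasClose (values : List Int) (threshold v : Int) : Prop :=
  (∃ w ∈ values, w ≠ v ∧ |v - w| ≤ threshold) ∨ (2 ≤ values.count v ∧ 0 ≤ threshold)

theorem mem_foldl_pvStep (t : Int) (l : List (Int × Int)) (g : List Int) (v : Int) :
    v ∈ l.foldl (pvStep t) g ↔ v ∈ g ∨ ∃ ab ∈ l, ab.2 - ab.1 ≤ t ∧ (v = ab.1 ∨ v = ab.2) := by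
  induction l generalizing g with
  | nil => simp
  | cons ab l ih =>
    simp only [List.foldl_cons, ih, List.mem_cons]
    unfold pvStep
    split_ifs with h
    · simp only [PySem.Set.mem_add]
      constructor
      · rintro (((hg | h1) | h2) | ⟨cd, hcd, hle, hv⟩)
        · exact Or.inl hg
        · exact Or.inr ⟨ab, Or.inl rfl, h, Or.inl h1⟩
        · exact Or.inr ⟨ab, Or.inl rfl, h, Or.inr h2⟩
        · exact Or.inr ⟨cd, Or.inr hcd, hle, hv⟩
      · rintro (hg | ⟨cd, (rfl | hcd), hle, hv⟩)
        · exact Or.inl (Or.inl (Or.inl hg))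
        · rcases hv with h1 | h2
          · exact Or.inl (Or.inl (Or.inr h1))
          · exact Or.inl (Or.inr h2)
        · exact Or.inr ⟨cd, hcd, hle, hv⟩
    · constructor
      · rintro (hg | ⟨cd, hcd, hle, hv⟩)
        · exact Or.inl hg
        · exact Or.inr ⟨cd, Or.inr hcd, hle, hv⟩
      · rintro (hg | ⟨cd, (rfl | hcd), hle, hv⟩)
        · exact Or.inl hg
        · exact absurd hle h
        · exact Or.inr ⟨cd, hcd, hle, hv⟩

theorem mem_zip_tail (s : List Int) (ab : Int × Int) :
    ab ∈ s.zip s.tail ↔ ∃ p, ∃ _ : p + 1 < s.length, ab = (s[p], s[p + 1]) := by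
  constructor
  · intro h
    obtain ⟨i, hi, he⟩ := List.mem_iff_getElem.1 h
    have hlen : i + 1 < s.length := by
      simp [List.length_zip, List.length_tail] at hi; omega
    refine ⟨i, hlen, ?_⟩
    rw [← he, List.getElem_zip, List.getElem_tail]
  · rintro ⟨p, hp, rfl⟩
    refine List.mem_iff_getElem.2 ⟨p, ?_, ?_⟩
    · simp [List.length_zip, List.length_tail]; omega
    · rw [List.getElem_zip, List.getElem_tail]

theorem count_two_iff (l : List Int) (v : Int) :
    2 ≤ l.count v ↔ ∃ p q : Nat, p < q ∧ l[p]? = some v ∧ l[q]? = some v := by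
  induction l with
  | nil => simp
  | cons a l ih =>
    by_cases hav : a = v
    · subst hav
      simp only [List.count_cons_self]
      constructor
      · intro h
        have h1 : 1 ≤ l.count a := by omega
        have hm : a ∈ l := List.count_pos_iff.1 (by omega)
        obtain ⟨q, hq, he⟩ := List.mem_iff_getElem.1 hm
        exact ⟨0, q + 1, by omega, by simp, by simp [List.getElem?_eq_some_iff]; exact ⟨hq, he⟩⟩
      · rintro ⟨p, q, hpq, hp, hq⟩
        cases p with
        | zero =>
          obtain ⟨q', rfl⟩ : ∃ q', q = q' + 1 := ⟨q - 1, by omega⟩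
          simp only [List.getElem?_cons_succ] at hq
          have : a ∈ l := by
            rw [List.getElem?_eq_some_iff] at hq
            obtain ⟨h1, h2⟩ := hq
            exact h2 ▸ List.getElem_mem h1
          have := List.count_pos_iff.2 this
          omega
        | succ p' =>
          obtain ⟨q', rfl⟩ : ∃ q', q = q' + 1 := ⟨q - 1, by omega⟩
          simp only [List.getElem?_cons_succ] at hp hq
          have := ih.2 ⟨p', q', by omega, hp, hq⟩
          omega
    · simp only [List.count_cons_of_ne hav, ih]
      constructor
      · rintro ⟨p, q, hpq, hp, hq⟩
        exact ⟨p + 1, q + 1, by omega, by simpa using hp, by simpa using hq⟩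
      · rintro ⟨p, q, hpq, hp, hq⟩
        cases p with
        | zero =>
          simp only [List.getElem?_cons_zero, Option.some.injEq] at hp
          exact absurd hp hav
        | succ p' =>
          obtain ⟨q', rfl⟩ : ∃ q', q = q' + 1 := ⟨q - 1, by omega⟩
          simp only [List.getElem?_cons_succ] at hp hq
          exact ⟨p', q', by omega, hp, hq⟩

-- the sorted copy of values, fixed identity key
def pvSorted (values : List Int) : List Int := PySem.List.sorted values (fun x => x) false

theorem pvSorted_mono (values : List Int) (p q : Nat) (hpq : p ≤ q) (hq : q < (pvSorted values).length) :
    (pvSorted values)[p]'(by omega) ≤ (pvSorted values)[q] := by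
  exact PySem.List.sorted_id_getElem_mono values hpq hq

theorem pvSorted_perm (values : List Int) : (pvSorted values).Perm values :=
  PySem.List.sorted_perm values (fun x => x) false


def pvGoodSet (values : List Int) (threshold : Int) : List Int :=
  ((pvSorted values).zip (pvSorted values).tail).foldl (pvStep threshold) []

theorem mem_goodSet_iff (values : List Int) (t v : Int) :
    v ∈ pvGoodSet values t ↔ ∃ p, ∃ _ : p + 1 < (pvSorted values).length,
      (pvSorted values)[p + 1] - (pvSorted values)[p]'(by omega) ≤ t ∧
        (v = (pvSorted values)[p]'(by omega) ∨ v = (pvSorted values)[p + 1]) := by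
  unfold pvGoodSet
  rw [mem_foldl_pvStep]
  simp only [List.not_mem_nil, false_or]
  constructor
  · rintro ⟨ab, hab, hle, hv⟩
    obtain ⟨p, hp, rfl⟩ := (mem_zip_tail _ _).1 hab
    exact ⟨p, hp, hle, hv⟩
  · rintro ⟨p, hp, hle, hv⟩
    exact ⟨_, (mem_zip_tail _ _).2 ⟨p, hp, rfl⟩, hle, hv⟩

theorem good_iff_hasClose (values : List Int) (t v : Int) (hv : v ∈ values) :
    v ∈ pvGoodSet values t ↔ hasClose values t v := by
  rw [mem_goodSet_iff]
  constructor
  · rintro ⟨p, hp, hle, hv12⟩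
    have hmono := pvSorted_mono values p (p + 1) (by omega) hp
    by_cases heq : (pvSorted values)[p]'(by omega) = (pvSorted values)[p + 1]
    · right
      have h2 : 2 ≤ (pvSorted values).count v := by
        apply (count_two_iff _ _).2
        refine ⟨p, p + 1, by omega, ?_, ?_⟩
        · rw [List.getElem?_eq_getElem (by omega)]
          rcases hv12 with rfl | rfl
          · rfl
          · rw [heq]
        · rw [List.getElem?_eq_getElem hp]
          rcases hv12 with rfl | rfl
          · rw [heq]
          · rfl
      rw [(pvSorted_perm values).count_eq] at h2
      exact ⟨h2, by omega⟩
    · left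
      rcases hv12 with rfl | rfl
      · refine ⟨(pvSorted values)[p + 1], (pvSorted_perm values).mem_iff.1 (List.getElem_mem hp), Ne.symm heq, ?_⟩
        rw [abs_sub_comm, abs_of_nonneg (by omega)]
        exact hle
      · refine ⟨(pvSorted values)[p]'(by omega), (pvSorted_perm values).mem_iff.1 (List.getElem_mem (by omega)), heq, ?_⟩
        rw [abs_of_nonneg (by omega)]
        exact hle
  · rintro (⟨w, hw, hne, hle⟩ | ⟨hcnt, ht⟩)
    · have hv' : v ∈ pvSorted values := (pvSorted_perm values).mem_iff.2 hv
      have hw' : w ∈ pvSorted values := (pvSorted_perm values).mem_iff.2 hw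
      obtain ⟨i, hi, hvi⟩ := List.mem_iff_getElem.1 hv'
      obtain ⟨j, hj, hwj⟩ := List.mem_iff_getElem.1 hw'
      rcases lt_trichotomy v w with hlt | heq | hgt
      · have hij : i < j := by
          by_contra hc
          have hc' : j ≤ i := by omega
          have := pvSorted_mono values j i hc' hi
          rw [hvi, hwj] at this
          omega
        have habs : |v - w| = w - v := by rw [abs_sub_comm]; exact abs_of_nonneg (by omega)
        have h1 := pvSorted_mono values (i + 1) j (by omega) hj
        have h2 := pvSorted_mono values i (i + 1) (by omega) (by omega)
        refine ⟨i, by omega, by rw [hwj] at h1; rw [hvi] at h2 ⊢; omega, Or.inl hvi.symm⟩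
      · exact absurd heq.symm hne
      · have hji : j < i := by
          by_contra hc
          have hc' : i ≤ j := by omega
          have := pvSorted_mono values i j hc' hj
          rw [hvi, hwj] at this
          omega
        obtain ⟨p, rfl⟩ : ∃ p, i = p + 1 := ⟨i - 1, by omega⟩
        have habs : |v - w| = v - w := abs_of_nonneg (by omega)
        have h1 := pvSorted_mono values j p (by omega) (by omega)
        have h2 := pvSorted_mono values p (p + 1) (by omega) hi
        refine ⟨p, by omega, by rw [hwj] at h1; rw [hvi] at h2 ⊢; omega, Or.inr hvi.symm⟩
    · have h2 : 2 ≤ (pvSorted values).count v := by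
        rwa [(pvSorted_perm values).count_eq]
      obtain ⟨p, q, hpq, hp, hq⟩ := (count_two_iff _ _).1 h2
      rw [List.getElem?_eq_some_iff] at hp hq
      obtain ⟨hq1, hq2⟩ := hq
      obtain ⟨hp1, hp2⟩ := hp
      have hplen : p + 1 < (pvSorted values).length := by omega
      have m1 := pvSorted_mono values p (p + 1) (by omega) hplen
      have m2 := pvSorted_mono values (p + 1) q (by omega) hq1
      refine ⟨p, hplen, ?_, Or.inl hp2.symm⟩
      rw [hp2] at m1 ⊢
      rw [hq2] at m2
      omega

theorem exists_idx_iff_hasClose (values : List Int) (t : Int) (k : Nat) (hk : k < values.length) :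
    (∃ j : Nat, ∃ _ : j < values.length, j ≠ k ∧ |values[k] - values[j]| ≤ t) ↔
      hasClose values t values[k] := by
  constructor
  · rintro ⟨j, hj, hne, hle⟩
    by_cases hjk : values[j] = values[k]
    · right
      refine ⟨?_, ?_⟩
      · apply (count_two_iff values _).2
        rcases Nat.lt_or_ge j k with h | h
        · exact ⟨j, k, h, by rw [List.getElem?_eq_getElem hj, hjk], by rw [List.getElem?_eq_getElem hk]⟩
        · exact ⟨k, j, by omega, by rw [List.getElem?_eq_getElem hk], by rw [List.getElem?_eq_getElem hj, hjk]⟩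
      · rw [hjk, sub_self, abs_zero] at hle
        exact hle
    · exact Or.inl ⟨values[j], List.getElem_mem hj, hjk, hle⟩
  · rintro (⟨w, hw, hne, hle⟩ | ⟨hcnt, ht⟩)
    · obtain ⟨j, hj, hwj⟩ := List.mem_iff_getElem.1 hw
      refine ⟨j, hj, ?_, by rw [hwj]; exact hle⟩
      intro hjk
      subst hjk
      exact hne (hwj ▸ rfl)
    · obtain ⟨p, q, hpq, hp, hq⟩ := (count_two_iff values _).1 hcnt
      rw [List.getElem?_eq_some_iff] at hp hq
      obtain ⟨hp1, hp2⟩ := hp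
      obtain ⟨hq1, hq2⟩ := hq
      by_cases hpk : p = k
      · refine ⟨q, hq1, by omega, ?_⟩
        rw [hq2, sub_self, abs_zero]
        exact ht
      · refine ⟨p, hp1, hpk, ?_⟩
        rw [hp2, sub_self, abs_zero]
        exact ht

theorem map_snd_filter_enumerate (xs : List Int) (st : Int) (p : Int × Int → Bool) (q : Int → Bool)
    (h : ∀ iv ∈ PySem.List.enumerate xs st, p iv = q iv.2) :
    ((PySem.List.enumerate xs st).filter p).map (fun iv => iv.2) = xs.filter q := by
  induction xs generalizing st with
  | nil => simp [PySem.List.enumerate_nil]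
  | cons x xs ih =>
    rw [PySem.List.enumerate_cons] at h ⊢
    have hx : p (st, x) = q x := h _ List.mem_cons_self
    have ht := ih (st + 1) (fun iv hiv => h iv (List.mem_cons_of_mem _ hiv))
    rw [List.filter_cons, List.filter_cons, hx]
    cases hqx : q x <;> simp [ht]

theorem hasNeighbor_eq (values : List Int) (t : Int) (m : Nat) (hm : m < values.length) :
    ((PySem.List.enumerate values).any
        (fun jo => decide (((0 : Int) + m) ≠ jo.1) && decide (|values[m] - jo.2| ≤ t)))
      = PySem.Set.contains (pvGoodSet values t) values[m] := by
  rw [Bool.eq_iff_iff, PySem.Set.contains_iff,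
    good_iff_hasClose values t values[m] (List.getElem_mem hm),
    ← exists_idx_iff_hasClose values t m hm]
  simp only [List.any_eq_true, PySem.List.mem_enumerate_iff, Bool.and_eq_true, decide_eq_true_eq]
  constructor
  · rintro ⟨x, ⟨j, hj, rfl⟩, hne, hle⟩
    refine ⟨j, hj, ?_, hle⟩
    intro hjm
    subst hjm
    exact hne rfl
  · rintro ⟨j, hj, hne, hle⟩
    refine ⟨(0 + (j : Int), values[j]), ⟨j, hj, rfl⟩, ?_, hle⟩
    simp only [ne_eq, add_right_inj, Int.natCast_inj]
    omega

theorem A_eq_B (values : List Int) (t : Int) :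
    filter_by_proximity values t = filter_by_proximity_alt values t := by
  have hB : filter_by_proximity_alt values t =
      values.filter (fun v => PySem.Set.contains (pvGoodSet values t) v) := by
    simp only [filter_by_proximity_alt, pvGoodSet, pvSorted,
      PySem.List.slice_from_one, PySem.Set.empty]
    rfl
  have hA : filter_by_proximity values t =
      ((PySem.List.enumerate values).filter
        (fun iv => (PySem.List.enumerate values).any
          (fun jo => decide (iv.1 ≠ jo.1) && decide (|iv.2 - jo.2| ≤ t)))).map (fun iv => iv.2) := by
    show List.foldl
        (fun result iv =>
          if ((PySem.List.enumerate values).any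
              (fun jo => decide (iv.1 ≠ jo.1) && decide (|iv.2 - jo.2| ≤ t))) = true
          then result ++ [iv.2] else result) [] (PySem.List.enumerate values) = _
    rw [PySem.List.foldl_append_if
      (p := fun (iv : Int × Int) => (PySem.List.enumerate values).any
        (fun jo => decide (iv.1 ≠ jo.1) && decide (|iv.2 - jo.2| ≤ t)))
      (f := fun (iv : Int × Int) => iv.2)]
    rw [List.nil_append]
  rw [hA, hB]
  apply map_snd_filter_enumerate
  intro iv hiv
  rw [PySem.List.mem_enumerate_iff] at hiv
  obtain ⟨m, hm, rfl⟩ := hiv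
  exact hasNeighbor_eq values t m hm

-- ===== VERDICT (by name: the statement is the Claim_ definition above) =====
theorem filter_by_proximity_spec : Claim_equal_filter_by_proximity := by
  intro values threshold _
  unfold Spec_filter_by_proximity
  exact A_eq_B values threshold
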